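-- pv_equiv track=rewrite | github.com/Cioscos/ASCII-Video-Player | calibration_frame.py | generate_calibration_frame
-- ===== SOURCE A (Python) =====
-- def generate_calibration_frame(width, height):
--     """
--     Genera un frame ASCII di calibrazione tutto bianco, con un bordo e una croce centrale.
--
--     Args:
--         width (int): Larghezza dell'output ASCII.
--         height (int): Altezza dell'output ASCII.
--
--     Returns:
--         str: Stringa ASCII con il frame bianco, bordi e croce centrale.
--     """
--     # Caratteri
--     BORDER_CHAR = "#"
--     CROSS_CHAR = "+"
--     WHITE_CHAR = "█"  # Blocchi pieni per simulare un frame bianco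
--
--     # Assicura che le dimensioni siano almeno 3x3
--     width = max(3, width)
--     height = max(3, height)
--
--     # Crea una matrice di caratteri bianchi
--     # Ottimizzazione: pre-allocazione delle stringhe di riga
--     rows = [BORDER_CHAR * width]
--
--     # Riga superiore (bordo)
--
--     # Righe intermedie
--     for y in range(1, height - 1):
--         if y == height // 2:
--             # Riga centrale con croce
--             row = BORDER_CHAR + CROSS_CHAR * (width - 2) + BORDER_CHAR
--         else:
--             # Riga normale con bordi
--             row = BORDER_CHAR + WHITE_CHAR * (width - 2) + BORDER_CHAR
--         rows.append(row)
--
--     # Riga inferiore (bordo)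
--     if height > 1:
--         rows.append(BORDER_CHAR * width)
--
--     # Sovrascrivere la croce verticale
--     center_x = width // 2
--     for y in range(1, height - 1):
--         if y != height // 2:  # Salta la riga centrale (già con croce)
--             row_list = list(rows[y])
--             row_list[center_x] = CROSS_CHAR
--             rows[y] = "".join(row_list)
--
--     return "\n".join(rows)
-- ===== SOURCE B (Python) =====
-- def generate_calibration_frame(width, height):
--     """Build each of the three distinct row kinds exactly once (border, cross-bar,
--     and the white row with its centre cell placed per cell in a single pass),
--     then select per row index; no second overwrite loop."""
--     width = max(3, width)
--     height = max(3, height)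
--     cx = width // 2
--     cy = height // 2
--     border = "#" * width
--     cross = "#" + "+" * (width - 2) + "#"
--     white = "".join(
--         "#" if (x == 0 or x == width - 1) else ("+" if x == cx else "█")
--         for x in range(width)
--     )
--     return "\n".join(
--         border if (y == 0 or y == height - 1) else (cross if y == cy else white)
--         for y in range(height)
--     )
-- ===== Notes on version B (the rewrite author's own statement) =====
-- stated objective: faster
-- what changed: B constructs each of the three distinct row kinds exactly once (placing border/cross/centre characters per cell in a single pass) and selects among them per row index, instead of A's build-then-patch approach that rebuilds every middle row and overwrites its centre column in a second loop.
import Mathlib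
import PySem

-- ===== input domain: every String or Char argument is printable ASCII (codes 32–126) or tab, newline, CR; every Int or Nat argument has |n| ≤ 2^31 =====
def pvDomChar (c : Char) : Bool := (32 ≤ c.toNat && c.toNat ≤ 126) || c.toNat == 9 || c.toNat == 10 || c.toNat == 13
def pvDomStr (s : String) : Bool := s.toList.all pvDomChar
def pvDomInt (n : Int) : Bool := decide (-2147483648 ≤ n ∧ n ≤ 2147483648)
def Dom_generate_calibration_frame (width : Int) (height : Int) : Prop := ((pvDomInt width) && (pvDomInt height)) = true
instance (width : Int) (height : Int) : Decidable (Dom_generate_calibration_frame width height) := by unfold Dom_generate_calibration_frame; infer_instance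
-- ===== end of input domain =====

-- B builds each of the three distinct row kinds once (the white row per cell, in one
-- pass) and selects per row index; A rebuilds every middle row and then patches its
-- centre column in a second loop.

-- '#' * n, as a char list
def pvRep (c : Char) (n : Int) : List Char := PySem.List.pyRepeat [c] n

-- ===== PORT A =====
def generate_calibration_frame (width : Int) (height : Int) : String :=
  let w := max 3 width
  let h := max 3 height
  let rows : List (List Char) := [pvRep '#' w]
  let rows := (PySem.List.pyRange 1 (h - 1) 1).foldl (fun acc y =>
      acc ++ [if y = PySem.Int.floordiv h 2
              then ['#'] ++ pvRep '+' (w - 2) ++ ['#']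
              else ['#'] ++ pvRep '█' (w - 2) ++ ['#']]) rows
  let rows := if h > 1 then rows ++ [pvRep '#' w] else rows
  let cx := PySem.Int.floordiv w 2
  let rows := (PySem.List.pyRange 1 (h - 1) 1).foldl (fun acc y =>
      if y ≠ PySem.Int.floordiv h 2
      then PySem.List.pySetD acc y (PySem.List.pySetD (PySem.List.pyGetD acc y []) cx '+')
      else acc) rows
  String.ofList (PySem.Chars.join ['\n'] rows)

-- ===== PORT B =====
def generate_calibration_frame_alt (width : Int) (height : Int) : String :=
  let w := max 3 width
  let h := max 3 height
  let cx := PySem.Int.floordiv w 2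
  let cy := PySem.Int.floordiv h 2
  let border := pvRep '#' w
  let cross := ['#'] ++ pvRep '+' (w - 2) ++ ['#']
  let white := PySem.Chars.join [] ((PySem.List.pyRange 0 w 1).map (fun x =>
        if x = 0 ∨ x = w - 1 then ['#'] else if x = cx then ['+'] else ['█']))
  String.ofList (PySem.Chars.join ['\n'] ((PySem.List.pyRange 0 h 1).map (fun y =>
        if y = 0 ∨ y = h - 1 then border else if y = cy then cross else white)))

-- ===== PRECONDITION & SPEC =====
def Spec_generate_calibration_frame (width : Int) (height : Int) (out : String) : Prop := out = generate_calibration_frame_alt width height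
instance (width : Int) (height : Int) (out : String) : Decidable (Spec_generate_calibration_frame width height out) := by unfold Spec_generate_calibration_frame; infer_instance

-- ===== CLAIM (what is proved, stated in full; the proofs are below) =====
def Claim_equal_generate_calibration_frame : Prop := ∀ (width : Int) (height : Int), Dom_generate_calibration_frame width height → Spec_generate_calibration_frame width height (generate_calibration_frame width height)

-- ===== LEMMAS AND PROOFS =====

-- A's second (patch) loop, characterised elementwise
theorem pv_patch_get (g : List Char → List Char) (cy : Int) :
    ∀ (n a : Nat) (rows : List (List Char)) (k : Nat),
    (((List.range n).map (fun j => ((a + j : Nat) : Int))).foldl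
       (fun acc y => if y ≠ cy then PySem.List.pySetD acc y (g (PySem.List.pyGetD acc y [])) else acc) rows)[k]?
    = if a ≤ k ∧ k < a + n ∧ (k : Int) ≠ cy then (rows[k]?).map g else rows[k]? := by
  intro n
  induction n with
  | zero =>
    intro a rows k
    simp only [List.range_zero, List.map_nil, List.foldl_nil]
    rw [if_neg (by omega)]
  | succ n ih =>
    intro a rows k
    rw [List.range_succ_eq_map, List.map_cons, List.map_map]
    have hmap : (List.map ((fun j => ((a + j : Nat) : Int)) ∘ Nat.succ) (List.range n))
        = List.map (fun j => (((a + 1) + j : Nat) : Int)) (List.range n) := by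
      apply List.map_congr_left
      intro j _
      simp only [Function.comp]
      push_cast
      ring
    rw [hmap, List.foldl_cons, ih (a + 1)]
    have hF : ((if ((a : Nat) : Int) ≠ cy
        then PySem.List.pySetD rows ((a : Nat) : Int) (g (PySem.List.pyGetD rows ((a : Nat) : Int) []))
        else rows))[k]?
        = if k = a ∧ ((a : Nat) : Int) ≠ cy then (rows[k]?).map g else rows[k]? := by
      by_cases hacy : ((a : Nat) : Int) = cy
      · simp [hacy]
      · rw [if_pos hacy, PySem.List.pySetD_natCast, PySem.List.pyGetD_natCast, List.getElem?_set]
        by_cases hk : k = a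
        · subst hk
          by_cases hlen : k < rows.length
          · rw [List.getD_eq_getElem?_getD, List.getElem?_eq_getElem hlen]
            simp [hlen, hacy]
          · rw [List.getElem?_eq_none (by omega)]
            simp [hlen, hacy]
        · rw [if_neg (by omega), if_neg (by simp [hk])]
    simp only [Nat.add_zero]
    rw [hF]
    by_cases hk : k = a
    · subst hk
      rw [if_neg (by omega)]
      by_cases hcy : ((k : Nat) : Int) = cy
      · rw [if_neg (by simp [hcy]), if_neg (by simp [hcy])]
      · rw [if_pos ⟨rfl, hcy⟩, if_pos ⟨le_refl _, by omega, hcy⟩]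
    · have hne : ¬(k = a ∧ ((a : Nat) : Int) ≠ cy) := by simp [hk]
      simp only [if_neg hne]
      by_cases hcy : ((k : Nat) : Int) = cy
      · rw [if_neg (by simp [hcy]), if_neg (by simp [hcy])]
      · by_cases hr : a + 1 ≤ k ∧ k < a + 1 + n
        · rw [if_pos ⟨hr.1, hr.2, hcy⟩, if_pos ⟨by omega, by omega, hcy⟩]
        · rw [if_neg (by rintro ⟨h1, h2, -⟩; exact hr ⟨h1, h2⟩),
              if_neg (by rintro ⟨h1, h2, -⟩; exact hr ⟨by omega, by omega⟩)]

-- a patched white row of A equals B's per-cell middle row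
theorem pv_row_eq (w : Int) (hw : 3 ≤ w) :
    PySem.List.pySetD (['#'] ++ pvRep '█' (w - 2) ++ ['#']) (PySem.Int.floordiv w 2) '+'
    = PySem.Chars.join [] ((PySem.List.pyRange 0 w 1).map (fun x =>
        if x = 0 ∨ x = w - 1 then ['#'] else if x = PySem.Int.floordiv w 2 then ['+'] else ['█'])) := by
  obtain ⟨W, rfl⟩ : ∃ W : Nat, w = (W : Int) := ⟨w.toNat, (Int.toNat_of_nonneg (by omega)).symm⟩
  have hW : 3 ≤ W := by exact_mod_cast hw
  have hdiv : PySem.Int.floordiv (W : Int) 2 = ((W / 2 : Nat) : Int) := by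
    have h1 : PySem.Int.floordiv (W : Int) 2 = (W : Int) / 2 := by simp [pysem]
    rw [h1]; omega
  have hcell : ∀ x : Int, (if x = 0 ∨ x = (W : Int) - 1 then ['#']
        else if x = PySem.Int.floordiv (W : Int) 2 then ['+'] else ['█'])
      = [if x = 0 ∨ x = (W : Int) - 1 then '#'
        else if x = PySem.Int.floordiv (W : Int) 2 then '+' else '█'] := by
    intro x; split_ifs <;> rfl
  rw [List.map_congr_left (fun x _ => hcell x)]
  rw [show (fun x : Int => [if x = 0 ∨ x = (W : Int) - 1 then '#'
        else if x = PySem.Int.floordiv (W : Int) 2 then '+' else '█'])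
      = (fun c => [c]) ∘ (fun x : Int => if x = 0 ∨ x = (W : Int) - 1 then '#'
        else if x = PySem.Int.floordiv (W : Int) 2 then '+' else '█') from rfl]
  rw [← List.map_map, PySem.Chars.join_nil_singletons]
  rw [hdiv, PySem.List.pySetD_natCast]
  unfold pvRep
  rw [PySem.List.pyRepeat_singleton]
  have htn : ((W : Int) - 2).toNat = W - 2 := by omega
  rw [htn]
  have hbase : ∀ j, j < W → (['#'] ++ List.replicate (W - 2) '█' ++ ['#'])[j]?
      = some (if j = 0 ∨ j = W - 1 then '#' else '█') := by
    intro j hj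
    match j with
    | 0 => simp
    | (j + 1) =>
      rw [List.append_assoc, List.singleton_append, List.getElem?_cons_succ]
      by_cases hmid : j < W - 2
      · rw [List.getElem?_append_left (by simp; omega), List.getElem?_replicate]
        rw [if_pos hmid, if_neg (by omega)]
      · rw [List.getElem?_append_right (by simp; omega)]
        have hj2 : j - (List.replicate (W - 2) '█').length = 0 := by simp; omega
        rw [hj2, if_pos (by omega)]
        rfl
  apply List.ext_getElem?
  intro k
  rw [List.getElem?_set, List.getElem?_map, PySem.List.getElem?_pyRange_one]
  have hlen : (['#'] ++ List.replicate (W - 2) '█' ++ ['#']).length = W := by simp; omega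
  by_cases hk : k < W
  · rw [if_pos (by omega : k < ((W : Int) - 0).toNat)]
    simp only [Option.map_some, zero_add]
    by_cases hc : W / 2 = k
    · rw [if_pos hc, if_pos (by omega), if_neg (by omega), if_pos (by omega)]
    · rw [if_neg hc, hbase k hk]
      by_cases hk0 : k = 0
      · rw [if_pos (by omega), if_pos (by left; omega)]
      · by_cases hkl : k = W - 1
        · rw [if_pos (by omega), if_pos (by right; omega)]
        · rw [if_neg (by omega), if_neg (by omega), if_neg (by omega)]
  · rw [if_neg (by omega), if_neg (by omega), List.getElem?_eq_none (by omega)]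
    rfl

-- the two row lists are equal
theorem pv_rows_eq (w h : Int) (hw : 3 ≤ w) (hh : 3 ≤ h) :
    (PySem.List.pyRange 1 (h - 1) 1).foldl (fun acc y =>
        if y ≠ PySem.Int.floordiv h 2
        then PySem.List.pySetD acc y
              (PySem.List.pySetD (PySem.List.pyGetD acc y []) (PySem.Int.floordiv w 2) '+')
        else acc)
      (if h > 1
       then ((PySem.List.pyRange 1 (h - 1) 1).foldl (fun acc y =>
              acc ++ [if y = PySem.Int.floordiv h 2
                      then ['#'] ++ pvRep '+' (w - 2) ++ ['#']
                      else ['#'] ++ pvRep '█' (w - 2) ++ ['#']]) [pvRep '#' w]) ++ [pvRep '#' w]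
       else (PySem.List.pyRange 1 (h - 1) 1).foldl (fun acc y =>
              acc ++ [if y = PySem.Int.floordiv h 2
                      then ['#'] ++ pvRep '+' (w - 2) ++ ['#']
                      else ['#'] ++ pvRep '█' (w - 2) ++ ['#']]) [pvRep '#' w])
    = (PySem.List.pyRange 0 h 1).map (fun y =>
        if y = 0 ∨ y = h - 1 then pvRep '#' w
        else if y = PySem.Int.floordiv h 2 then ['#'] ++ pvRep '+' (w - 2) ++ ['#']
        else PySem.Chars.join [] ((PySem.List.pyRange 0 w 1).map (fun x =>
              if x = 0 ∨ x = w - 1 then ['#']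
              else if x = PySem.Int.floordiv w 2 then ['+'] else ['█']))) := by
  obtain ⟨H, rfl⟩ : ∃ H : Nat, h = (H : Int) := ⟨h.toNat, (Int.toNat_of_nonneg (by omega)).symm⟩
  have hH : 3 ≤ H := by exact_mod_cast hh
  have hcy : PySem.Int.floordiv (H : Int) 2 = ((H / 2 : Nat) : Int) := by
    have h1 : PySem.Int.floordiv (H : Int) 2 = (H : Int) / 2 := by simp [pysem]
    rw [h1]; omega
  have hcy1 : 1 ≤ H / 2 := by omega
  have hcy2 : H / 2 ≤ H - 2 := by omega
  rw [if_pos (by omega : (H : Int) > 1)]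
  rw [PySem.List.foldl_append_singleton_eq_map]
  rw [hcy]
  have hrange : PySem.List.pyRange 1 ((H : Int) - 1) 1
      = (List.range (H - 2)).map (fun j => ((1 + j : Nat) : Int)) := by
    rw [PySem.List.pyRange_one]
    have h2 : ((H : Int) - 1 - 1).toNat = H - 2 := by omega
    rw [h2]
    exact List.map_congr_left (fun j _ => by push_cast; ring)
  rw [hrange]
  apply List.ext_getElem?
  intro k
  rw [pv_patch_get (fun r => PySem.List.pySetD r (PySem.Int.floordiv w 2) '+')
        ((H / 2 : Nat) : Int) (H - 2) 1]
  rw [List.getElem?_map, PySem.List.getElem?_pyRange_one]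
  -- the pre-patch rows, elementwise
  have hrows1 : ∀ j : Nat,
      (([pvRep '#' w] ++ (List.map (fun j => ((1 + j : Nat) : Int)) (List.range (H - 2))).map
          (fun y => if y = ((H / 2 : Nat) : Int)
                    then ['#'] ++ pvRep '+' (w - 2) ++ ['#']
                    else ['#'] ++ pvRep '█' (w - 2) ++ ['#']) ++ [pvRep '#' w]))[j]?
      = if j < H then
          some (if j = 0 ∨ j = H - 1 then pvRep '#' w
                else if j = H / 2 then ['#'] ++ pvRep '+' (w - 2) ++ ['#']
                else ['#'] ++ pvRep '█' (w - 2) ++ ['#'])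
        else none := by
    intro j
    rw [List.map_map, List.append_assoc, List.singleton_append]
    match j with
    | 0 =>
      simp only [List.getElem?_cons_zero]
      rw [if_pos (by omega : 0 < H)]
      simp
    | (j + 1) =>
      simp only [List.getElem?_cons_succ]
      by_cases hmid : j < H - 2
      · rw [List.getElem?_append_left (by simp; omega), List.getElem?_map,
            List.getElem?_range hmid]
        simp only [Option.map_some, Function.comp_apply]
        by_cases hc : j + 1 = H / 2
        · rw [if_pos (by omega : ((1 + j : Nat) : Int) = ((H / 2 : Nat) : Int)),
              if_pos (by omega : j + 1 < H),
              if_neg (by omega : ¬(j + 1 = 0 ∨ j + 1 = H - 1)), if_pos hc]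
        · rw [if_neg (by omega : ¬((1 + j : Nat) : Int) = ((H / 2 : Nat) : Int)),
              if_pos (by omega : j + 1 < H),
              if_neg (by omega : ¬(j + 1 = 0 ∨ j + 1 = H - 1)), if_neg hc]
      · rw [List.getElem?_append_right (by simp; omega)]
        simp only [List.length_map, List.length_range]
        by_cases hlast : j + 1 = H - 1
        · rw [show j - (H - 2) = 0 from by omega]
          simp only [List.getElem?_cons_zero]
          rw [if_pos (by omega), if_pos (by right; omega)]
        · rw [List.getElem?_eq_none (by simp; omega), if_neg (by omega)]
  rw [List.append_assoc] at hrows1 ⊢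
  rw [hrows1 k]
  by_cases hk : k < H
  · rw [if_pos (by omega : k < ((H : Int) - 0).toNat)]
    simp only [Option.map_some, zero_add]
    by_cases hk0 : k = 0
    · rw [if_neg (by omega : ¬(1 ≤ k ∧ k < 1 + (H - 2) ∧ (k : Int) ≠ ((H / 2 : Nat) : Int))),
          if_pos hk, if_pos (by omega : k = 0 ∨ k = H - 1),
          if_pos (by omega : (k : Int) = 0 ∨ (k : Int) = (H : Int) - 1)]
    · by_cases hkl : k = H - 1
      · rw [if_neg (by omega : ¬(1 ≤ k ∧ k < 1 + (H - 2) ∧ (k : Int) ≠ ((H / 2 : Nat) : Int))),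
            if_pos hk, if_pos (by omega : k = 0 ∨ k = H - 1),
            if_pos (by omega : (k : Int) = 0 ∨ (k : Int) = (H : Int) - 1)]
      · rw [if_neg (by omega : ¬((k : Int) = 0 ∨ (k : Int) = (H : Int) - 1))]
        by_cases hc : k = H / 2
        · rw [if_neg (by omega : ¬(1 ≤ k ∧ k < 1 + (H - 2) ∧ (k : Int) ≠ ((H / 2 : Nat) : Int))),
              if_pos hk, if_neg (by omega : ¬(k = 0 ∨ k = H - 1)), if_pos hc,
              if_pos (by omega : (k : Int) = ((H / 2 : Nat) : Int))]
        · rw [if_pos (⟨by omega, by omega, by omega⟩ :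
                (1 ≤ k ∧ k < 1 + (H - 2) ∧ (k : Int) ≠ ((H / 2 : Nat) : Int))),
              if_pos hk, if_neg (by omega : ¬(k = 0 ∨ k = H - 1)), if_neg hc,
              if_neg (by omega : ¬(k : Int) = ((H / 2 : Nat) : Int))]
          simp only [Option.map_some]
          congr 1
          exact pv_row_eq w hw
  · rw [if_neg hk, if_neg (by omega : ¬(1 ≤ k ∧ k < 1 + (H - 2) ∧ (k : Int) ≠ ((H / 2 : Nat) : Int))),
        if_neg (by omega : ¬ k < ((H : Int) - 0).toNat)]
    rfl

-- ===== VERDICT (by name: the statement is the Claim_ definition above) =====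
theorem generate_calibration_frame_spec : Claim_equal_generate_calibration_frame := by
  intro width height _
  show generate_calibration_frame width height = generate_calibration_frame_alt width height
  unfold generate_calibration_frame generate_calibration_frame_alt
  exact congrArg String.ofList (congrArg (PySem.Chars.join ['\n'])
    (pv_rows_eq (max 3 width) (max 3 height) (le_max_left 3 width) (le_max_left 3 height)))
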